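-- pv_equiv track=rewrite | github.com/frendo/python_code | pe5.py | factor_append
-- ===== SOURCE A (Python) =====
-- def factor_append(factors, new):
--     if len(factors) == 0:
--         return new
--     for i in range(len(new)):
--         if i > 0  and new[i] == new[i-1]:
--             continue
--         new_count = new.count(new[i])
--         old_count = factors.count(new[i])
--         if new_count > old_count:
--             for j in range(new_count - old_count):
--                 factors.append(new[i])
--     factors.sort()
--     return factors
-- ===== SOURCE B (Python) =====
-- def factor_append(factors, new):
--     if len(factors) == 0:
--         return new
--     cnt = {}
--     for v in factors:
--         cnt[v] = cnt.get(v, 0) + 1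
--     newcnt = {}
--     for v in new:
--         newcnt[v] = newcnt.get(v, 0) + 1
--     for v, c in newcnt.items():
--         if c > cnt.get(v, 0):
--             cnt[v] = c
--     out = []
--     for v in sorted(cnt):
--         out += [v] * cnt[v]
--     factors[:] = out
--     return factors
-- ===== Notes on version B (the rewrite author's own statement) =====
-- stated objective: faster
-- what changed: Replaces A's per-index loop with repeated list.count scans and deficit appends by two counting tables built in one pass each, a max-multiplicity union of the tables, and a single sorted expansion of the merged counts.
import Mathlib
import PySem

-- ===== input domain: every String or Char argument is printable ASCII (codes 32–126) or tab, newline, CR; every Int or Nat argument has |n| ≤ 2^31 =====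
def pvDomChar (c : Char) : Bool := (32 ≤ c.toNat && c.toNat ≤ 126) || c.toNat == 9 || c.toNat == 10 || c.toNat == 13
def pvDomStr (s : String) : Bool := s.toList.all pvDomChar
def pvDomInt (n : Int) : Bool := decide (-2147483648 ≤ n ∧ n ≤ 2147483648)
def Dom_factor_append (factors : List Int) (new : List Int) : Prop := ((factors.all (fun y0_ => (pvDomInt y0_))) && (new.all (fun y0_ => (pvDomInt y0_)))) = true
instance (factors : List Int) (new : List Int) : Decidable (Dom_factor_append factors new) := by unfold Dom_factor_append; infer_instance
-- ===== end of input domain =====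

-- B replaces A's per-index deficit-append loop (with repeated .count scans) by two counting
-- tables, a max-multiplicity union and one sorted expansion. Both Pythons mutate `factors`
-- in place (A appends+sorts, B assigns factors[:]); the theorems are about the return value.

-- ===== PORT A =====
-- body of A's 'for i in range(len(new))' loop (indices are in range, so pyGetD is exact)
def faBody (new : List Int) (fs : List Int) (i : Int) : List Int :=
  if 0 < i ∧ PySem.List.pyGetD new i 0 = PySem.List.pyGetD new (i - 1) 0 then fs
  else
    let v := PySem.List.pyGetD new i 0
    let new_count : Int := (new.count v : Int)
    let old_count : Int := (fs.count v : Int)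
    if new_count > old_count then
      (PySem.List.pyRange 0 (new_count - old_count) 1).foldl (fun fs2 _ => fs2 ++ [v]) fs
    else fs

def factor_append (factors : List Int) (new : List Int) : List Int :=
  if factors.length = 0 then new
  else
    let factors := (PySem.List.pyRange 0 new.length 1).foldl (faBody new) factors
    PySem.List.sorted factors (fun x => x) false

-- ===== PORT B =====
def factor_append_alt (factors : List Int) (new : List Int) : List Int :=
  if factors.length = 0 then new
  else
    let cnt : PySem.Dict Int Int :=
      factors.foldl (fun d v => d.insert v (d.getD v 0 + 1)) PySem.Dict.empty
    let newcnt : PySem.Dict Int Int :=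
      new.foldl (fun d v => d.insert v (d.getD v 0 + 1)) PySem.Dict.empty
    let cnt := newcnt.items.foldl
      (fun d p => if p.2 > d.getD p.1 0 then d.insert p.1 p.2 else d) cnt
    let out := (PySem.List.sorted cnt.keys (fun x => x) false).foldl
      (fun acc v => acc ++ List.replicate (cnt.getD v 0).toNat v) []
    out

-- ===== PRECONDITION & SPEC =====
def Spec_factor_append (factors : List Int) (new : List Int) (out : List Int) : Prop := out = factor_append_alt factors new
instance (factors : List Int) (new : List Int) (out : List Int) : Decidable (Spec_factor_append factors new out) := by unfold Spec_factor_append; infer_instance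

-- ===== CLAIM (what is proved, stated in full; the proofs are below) =====
def Claim_equal_factor_append : Prop := ∀ (factors : List Int) (new : List Int), Dom_factor_append factors new → Spec_factor_append factors new (factor_append factors new)

-- ===== LEMMAS AND PROOFS =====

-- A's inner 'for j in range(d): factors.append(v)' loop appends d copies of v
theorem faInner (v : Int) (d : Int) (fs : List Int) :
    (PySem.List.pyRange 0 d 1).foldl (fun fs2 _ => fs2 ++ [v]) fs
      = fs ++ List.replicate d.toNat v := by
  have h := PySem.List.foldl_append_singleton_eq_map (fun _ : Int => v) (PySem.List.pyRange 0 d 1) fs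
  simpa [List.map_const, PySem.List.length_pyRange_one] using h

-- invariant of A's main loop: after processing indices < a, every value seen in new.take a
-- has been topped up to max multiplicity, every other value keeps its original count c0
theorem faLoop_count (new : List Int) (c0 : Int → Nat) :
    ∀ (m a : Nat), new.length = a + m → ∀ fs : List Int,
      (∀ v, fs.count v = if v ∈ new.take a then max (c0 v) (new.count v) else c0 v) →
      ∀ v, ((PySem.List.pyRange a new.length 1).foldl (faBody new) fs).count v
            = if v ∈ new then max (c0 v) (new.count v) else c0 v := by
  intro m
  induction m with
  | zero =>
    intro a ha fs hinv v
    rw [PySem.List.pyRange_one_eq_nil (by exact_mod_cast (by omega : new.length ≤ a))]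
    simp only [List.foldl_nil]
    rw [hinv v, List.take_of_length_le (by omega)]
  | succ m ih =>
    intro a ha fs hinv v
    have halt : a < new.length := by omega
    rw [PySem.List.pyRange_one_cons (by exact_mod_cast halt), List.foldl_cons,
        (by push_cast; ring : ((a : Int) + 1) = ((a + 1 : Nat) : Int))]
    apply ih (a + 1) (by omega)
    intro w
    have hxa : PySem.List.pyGetD new (a : Int) 0 = new[a] := by
      rw [PySem.List.pyGetD_natCast]; exact List.getD_eq_getElem _ _ halt
    have htake : new.take (a + 1) = new.take a ++ [new[a]] := by
      rw [List.take_add_one]; simp [List.getElem?_eq_getElem halt]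
    unfold faBody
    by_cases hskip : 0 < (a : Int) ∧ PySem.List.pyGetD new (a:Int) 0 = PySem.List.pyGetD new ((a:Int) - 1) 0
    · -- skip: new[a] equals new[a-1], already inside the processed prefix
      rw [if_pos hskip]
      have ha0 : 0 < a := by exact_mod_cast hskip.1
      have hprev : PySem.List.pyGetD new ((a:Int) - 1) 0 = new[a-1] := by
        rw [(by omega : ((a:Int) - 1) = ((a - 1 : Nat) : Int)), PySem.List.pyGetD_natCast]
        exact List.getD_eq_getElem _ _ (by omega)
      have hmem : new[a] ∈ new.take a := by
        rw [hxa, hprev] at hskip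
        rw [hskip.2]
        exact List.mem_take_iff_getElem.mpr ⟨a-1, by omega, by simp⟩
      rw [hinv w, htake]
      by_cases hw : w ∈ new.take a
      · rw [if_pos hw, if_pos (List.mem_append.mpr (Or.inl hw))]
      · rw [if_neg hw, if_neg (by
          rw [List.mem_append]
          rintro (h | h)
          · exact hw h
          · exact hw ((List.mem_singleton.mp h) ▸ hmem))]
    · rw [if_neg hskip, hxa]
      by_cases hgt : ((new.count new[a] : Int)) > ((fs.count new[a] : Int))
      · rw [if_pos hgt, faInner, List.count_append, List.count_replicate, htake, hinv w]
        have hxnot : new[a] ∉ new.take a := by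
          intro hmem
          have h2 := hinv new[a]
          rw [if_pos hmem] at h2
          omega
        have hfsx : fs.count new[a] = c0 new[a] := by
          have h2 := hinv new[a]; rwa [if_neg hxnot] at h2
        by_cases hw : w = new[a]
        · rw [hw, if_neg hxnot, if_pos (by simp : (new[a] == new[a]) = true),
              if_pos (List.mem_append.mpr (Or.inr (List.mem_singleton.mpr rfl)))]
          rw [hfsx] at hgt ⊢
          omega
        · rw [if_neg (by simp [Ne.symm hw] : ¬ ((new[a] == w) = true))]
          by_cases hw2 : w ∈ new.take a
          · rw [if_pos hw2, if_pos (List.mem_append.mpr (Or.inl hw2))]; omega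
          · rw [if_neg hw2, if_neg (by
              rw [List.mem_append]
              rintro (h | h)
              · exact hw2 h
              · exact hw (List.mem_singleton.mp h))]
            omega
      · rw [if_neg hgt, htake, hinv w]
        by_cases hw : w = new[a]
        · rw [hw, if_pos (List.mem_append.mpr (Or.inr (List.mem_singleton.mpr rfl)))]
          by_cases hmem : new[a] ∈ new.take a
          · rw [if_pos hmem]
          · rw [if_neg hmem]
            have h2 := hinv new[a]
            rw [if_neg hmem] at h2
            rw [h2] at hgt
            omega
        · by_cases hw2 : w ∈ new.take a
          · rw [if_pos hw2, if_pos (List.mem_append.mpr (Or.inl hw2))]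
          · rw [if_neg hw2, if_neg (by
              rw [List.mem_append]
              rintro (h | h)
              · exact hw2 h
              · exact hw (List.mem_singleton.mp h))]

-- value looked up after B's union-max fold over explicit (key, c key) pairs
theorem unionMax_getD (c : Int → Int) (ks : List Int) :
    ∀ (d : PySem.Dict Int Int) (v : Int),
      ((ks.map (fun k => (k, c k))).foldl
          (fun d p => if p.2 > d.getD p.1 0 then d.insert p.1 p.2 else d) d).getD v 0
        = if v ∈ ks then max (d.getD v 0) (c v) else d.getD v 0 := by
  induction ks with
  | nil => simp
  | cons k ks ih =>
    intro d v
    simp only [List.map_cons, List.foldl_cons, ih, List.mem_cons]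
    by_cases hv : v = k
    · subst hv
      by_cases hc : c v > d.getD v 0
      · simp only [if_pos hc, PySem.Dict.getD_insert_self, true_or, if_true]
        omega
      · simp only [if_neg hc, true_or, if_true]
        omega
    · by_cases hc : c k > d.getD k 0
      · simp [hc, PySem.Dict.getD_insert_of_ne _ _ _ hv, hv]
      · simp [hc, hv]

theorem unionMax_keys_nodup (ps : List (Int × Int)) :
    ∀ d : PySem.Dict Int Int, d.keys.Nodup →
      (ps.foldl (fun d p => if p.2 > d.getD p.1 0 then d.insert p.1 p.2 else d) d).keys.Nodup := by
  induction ps with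
  | nil => exact fun d h => h
  | cons p ps ih =>
    intro d hd
    simp only [List.foldl_cons]
    apply ih
    split
    · exact PySem.Dict.nodup_keys_insert _ _ _ hd
    · exact hd

theorem count_flatMap_replicate (g : Int → Nat) (v : Int) :
    ∀ ks : List Int, ks.Nodup →
      (ks.flatMap (fun k => List.replicate (g k) k)).count v = if v ∈ ks then g v else 0 := by
  intro ks
  induction ks with
  | nil => simp
  | cons k ks ih =>
    intro hnd
    rcases List.nodup_cons.mp hnd with ⟨hk, hnd'⟩
    simp only [List.flatMap_cons, List.count_append, ih hnd', List.mem_cons]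
    by_cases hv : v = k
    · subst hv; simp [hk]
    · simp [List.count_replicate, Ne.symm hv, hv]

-- ===== VERDICT (by name: the statement is the Claim_ definition above) =====
theorem factor_append_spec : Claim_equal_factor_append := by
  intro factors new _
  unfold Spec_factor_append factor_append factor_append_alt
  by_cases h0 : factors.length = 0
  · rw [if_pos h0, if_pos h0]
  · rw [if_neg h0, if_neg h0]
    simp only [PySem.Dict.foldl_insert_getD_add_one_eq_counter, PySem.Dict.items_counter]
    set cnt' := ((PySem.Set.ofList new).map
        (fun k => (k, (new.count k : Int)))).foldl
        (fun d p => if p.2 > d.getD p.1 0 then d.insert p.1 p.2 else d)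
        (PySem.Dict.counter factors) with hcnt'
    -- the merged table looks up the max multiplicity
    have hgetD : ∀ v, cnt'.getD v 0 = ((max (factors.count v) (new.count v) : Nat) : Int) := by
      intro v
      rw [hcnt', unionMax_getD (fun k => (new.count k : Int)) (PySem.Set.ofList new)
            (PySem.Dict.counter factors) v]
      by_cases hv : v ∈ PySem.Set.ofList new
      · rw [if_pos hv, PySem.Dict.getD_counter]
        push_cast
        rfl
      · rw [if_neg hv, PySem.Dict.getD_counter]
        have : new.count v = 0 :=
          List.count_eq_zero.mpr (fun h => hv ((PySem.Set.mem_ofList _ _).mpr h))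
        rw [this]
        push_cast
        omega
    have hkeysnd : cnt'.keys.Nodup :=
      unionMax_keys_nodup _ _ (PySem.Dict.nodup_keys_counter factors)
    set ks' := PySem.List.sorted cnt'.keys (fun x => x) false with hks'
    have hksnd : ks'.Nodup := (PySem.List.sorted_perm cnt'.keys _ _).symm.nodup hkeysnd
    -- B's output as a flatMap of replicates
    rw [PySem.List.foldl_append_eq_flatMap (fun v => List.replicate (cnt'.getD v 0).toNat v) ks' []]
    rw [List.nil_append]
    set out := ks'.flatMap (fun v => List.replicate (cnt'.getD v 0).toNat v) with hout
    -- counts agree with max multiplicity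
    have hcountB : ∀ v, out.count v = max (factors.count v) (new.count v) := by
      intro v
      rw [hout, count_flatMap_replicate (fun k => (cnt'.getD k 0).toNat) v ks' hksnd]
      by_cases hv : v ∈ ks'
      · rw [if_pos hv, hgetD v]
        omega
      · rw [if_neg hv]
        have hnot : v ∉ cnt'.keys := fun h => hv ((PySem.List.mem_sorted _ _ _ _).mpr h)
        have hcf : cnt'.contains v = false := by
          rcases Bool.eq_false_or_eq_true (cnt'.contains v) with h | h
          · exact absurd ((PySem.Dict.contains_iff_mem_keys _ _).mp h) hnot
          · exact h
        have := PySem.Dict.getD_of_not_contains cnt' (0 : Int) hcf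
        rw [hgetD v] at this
        omega
    -- counts agree with A's loop result
    have hcountA : ∀ v, ((PySem.List.pyRange 0 new.length 1).foldl (faBody new) factors).count v
        = max (factors.count v) (new.count v) := by
      intro v
      have := faLoop_count new (fun v => factors.count v) new.length 0 (by omega) factors
        (by intro w; simp) v
      rw [(by norm_num : ((0 : Nat) : Int) = (0 : Int))] at this
      rw [this]
      by_cases hv : v ∈ new
      · rw [if_pos hv]
      · rw [if_neg hv, List.count_eq_zero.mpr hv]
        omega
    -- same multiset, B's output is sorted, so A's final sort returns exactly B's output
    have hperm : out.Perm ((PySem.List.pyRange 0 new.length 1).foldl (faBody new) factors) := by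
      rw [List.perm_iff_count]
      intro a
      rw [hcountB a, hcountA a]
    have hpair : out.Pairwise (· ≤ ·) := by
      rw [hout, List.pairwise_flatMap]
      constructor
      · intro a _
        exact List.pairwise_replicate.mpr (Or.inr le_rfl)
      · have hp : ks'.Pairwise (fun a b => a ≤ b) := PySem.List.sorted_pairwise cnt'.keys (fun x => x)
        exact hp.imp (by
          intro a b hab x hx y hy
          rw [List.eq_of_mem_replicate hx, List.eq_of_mem_replicate hy]
          exact hab)
    exact PySem.List.sorted_id_eq_of_perm_of_pairwise _ out hperm hpair
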